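-- pv_equiv track=rewrite | github.com/F12UK/PZ-Manakova | pz6/pz6(2).py | count_monotonic_ranges
-- ===== SOURCE A (Python) =====
-- def count_monotonic_ranges(nums: list) -> int:
--   """
--   Функция для подсчета монотонных промежутков в списке.
--
--   Args:
--       nums: Список чисел.
--
--   Returns:
--       Количество монотонных промежутков.
--   """
--   if not nums:
--     return 0
--
--   direction = None  # Направление (None, 1 - возрастает, -1 - убывает)
--   count = 1  # Количество монотонных промежутков
--
--   for i in range(1, len(nums)):
--     if nums[i] > nums[i - 1]:
--       if direction == -1:
--         count += 1
--       direction = 1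
--     elif nums[i] < nums[i - 1]:
--       if direction == 1:
--         count += 1
--       direction = -1
--
--   return count
-- ===== SOURCE B (Python) =====
-- def count_monotonic_ranges(nums: list) -> int:
--   """Different decomposition: collapse equal neighbours into one element, then
--   iteratively peel off maximal strictly monotonic runs (adjacent runs share
--   their boundary element), counting the peels."""
--   if not nums:
--     return 0
--   d = []
--   for x in nums:
--     if not d or d[-1] != x:
--       d.append(x)
--   count = 0
--   while d:
--     d = _peel(d)
--     count += 1
--   return count
--
-- def _peel(d):
--   """Remove the first maximal strictly monotonic run; the remainder starts at
--   the run's last element (shared boundary). Returns [] if the run covers d."""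
--   if len(d) < 2:
--     return []
--   up = d[1] > d[0]
--   i = 1
--   while i + 1 < len(d) and (d[i + 1] > d[i]) == up:
--     i += 1
--   if i + 1 == len(d):
--     return []
--   return d[i:]
-- ===== Notes on version B (the rewrite author's own statement) =====
-- stated objective: alternative
-- what changed: Replaces A's fused single pass maintaining a running direction/count with a two-stage run-peeling algorithm: first collapse equal neighbours, then repeatedly strip the maximal strictly monotonic prefix run (runs share their boundary element) and count the peels.
import Mathlib
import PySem

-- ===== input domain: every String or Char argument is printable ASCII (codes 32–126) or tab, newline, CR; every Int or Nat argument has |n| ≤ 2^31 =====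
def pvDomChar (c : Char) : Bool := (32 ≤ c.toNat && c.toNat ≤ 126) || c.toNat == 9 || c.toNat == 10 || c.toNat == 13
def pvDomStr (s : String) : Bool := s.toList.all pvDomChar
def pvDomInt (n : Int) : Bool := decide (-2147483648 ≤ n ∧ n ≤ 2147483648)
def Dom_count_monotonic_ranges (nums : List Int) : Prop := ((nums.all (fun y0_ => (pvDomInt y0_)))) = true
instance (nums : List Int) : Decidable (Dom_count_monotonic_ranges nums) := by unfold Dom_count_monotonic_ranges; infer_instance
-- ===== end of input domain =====

-- B replaces A's fused direction/count pass by a two-stage run-peeling algorithm (collapse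
-- equal neighbours, then repeatedly strip the maximal monotonic prefix run); same linear
-- cost, no speed claim.

-- ===== PORT A =====
-- A-side helper: the body of A's for-loop, acting on the state (direction, count).
def pvStepA (s : Option Int × Int) (a b : Int) : Option Int × Int :=
  if b > a then (some 1, if s.1 = some (-1) then s.2 + 1 else s.2)
  else if b < a then (some (-1), if s.1 = some 1 then s.2 + 1 else s.2)
  else s

-- indices i and i-1 from range(1, len(nums)) are always in range, so pyGetD's default 0 is never used
def count_monotonic_ranges (nums : List Int) : Int :=
  if nums = [] then 0
  else
    ((PySem.List.pyRange 1 (nums.length : Int) 1).foldl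
      (fun (s : Option Int × Int) i =>
        pvStepA s (PySem.List.pyGetD nums (i - 1) 0) (PySem.List.pyGetD nums i 0))
      (none, 1)).2

-- ===== PORT B =====
-- B-side helper: the inner while-loop of Python's _peel, walking the run
-- (prev = d[i], rest = d[i+1:]); returns d[i:] at the break, [] if the run reaches the end.
def pvScan (up : Bool) : Int → List Int → List Int
  | _, [] => []
  | prev, x :: t => if (decide (x > prev)) == up then pvScan up x t else prev :: x :: t

-- B-side helper: Python's _peel
def pvPeel (d : List Int) : List Int :=
  match d with
  | [] => []
  | [_] => []
  | a :: b :: t => pvScan (decide (b > a)) b t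

theorem pvScan_length (up : Bool) : ∀ (prev : Int) (t : List Int),
    (pvScan up prev t).length ≤ t.length + 1 := by
  intro prev t
  induction t generalizing prev with
  | nil => simp [pvScan]
  | cons x r ih =>
    simp only [pvScan]
    split
    · exact le_trans (ih x) (by simp)
    · simp

-- B-side helper: the 'while d: d = _peel(d); count += 1' loop
def pvRunsLoop : List Int → Int → Int
  | [], c => c
  | a :: t, c => pvRunsLoop (pvPeel (a :: t)) (c + 1)
termination_by d _ => d.length
decreasing_by
  cases t with
  | nil => simp [pvPeel]
  | cons b r =>
    simp only [pvPeel, List.length_cons]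
    have := pvScan_length (decide (b > a)) b r
    omega

def count_monotonic_ranges_alt (nums : List Int) : Int :=
  if nums = [] then 0
  else
    pvRunsLoop
      (nums.foldl (fun d x => if d = [] ∨ d.getLast? ≠ some x then d ++ [x] else d) [])
      0

-- ===== PRECONDITION & SPEC =====
def Spec_count_monotonic_ranges (nums : List Int) (out : Int) : Prop := out = count_monotonic_ranges_alt nums
instance (nums : List Int) (out : Int) : Decidable (Spec_count_monotonic_ranges nums out) := by unfold Spec_count_monotonic_ranges; infer_instance

-- ===== CLAIM (what is proved, stated in full; the proofs are below) =====
def Claim_equal_count_monotonic_ranges : Prop := ∀ (nums : List Int), Dom_count_monotonic_ranges nums → Spec_count_monotonic_ranges nums (count_monotonic_ranges nums)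

-- ===== LEMMAS AND PROOFS =====

-- sign of a consecutive difference, none for equal elements
def pvSgn (p : Int × Int) : Option Int :=
  if p.1 ≠ p.2 then some (if p.2 > p.1 then (1 : Int) else -1) else none

-- number of sign transitions, given the previous direction
def pvTrans : Option Int → List Int → Int
  | _, [] => 0
  | d, s :: rest => (if d = some (-s) then 1 else 0) + pvTrans (some s) rest

-- the filtered list of non-zero signs of consecutive differences
def pvSigns : List Int → List Int
  | a :: b :: t =>
      if a = b then pvSigns (b :: t)
      else (if b > a then (1 : Int) else -1) :: pvSigns (b :: t)
  | _ => []

-- collapse-equal-neighbours, head-parametrised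
def pvDed1 : Int → List Int → List Int
  | _, [] => []
  | p, x :: t => if x = p then pvDed1 p t else x :: pvDed1 x t

-- index-based loop over x::l equals the fold over consecutive pairs
theorem pv_idx_pairs (l : List Int) (x : Int) (init : Option Int × Int) :
    (List.range l.length).foldl
      (fun s k => pvStepA s ((x :: l).getD k 0) ((x :: l).getD (k + 1) 0)) init
    = ((x :: l).zip l).foldl (fun s p => pvStepA s p.1 p.2) init := by
  induction l generalizing x init with
  | nil => simp
  | cons b t ih =>
    rw [show (b :: t).length = t.length + 1 from rfl, List.range_succ_eq_map]
    simp only [List.foldl_cons, List.foldl_map, List.getD_cons_succ, List.getD_cons_zero,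
      List.zip_cons_cons]
    exact ih b (pvStepA init x b)

-- A's fold computes the initial count plus the number of sign transitions
theorem pv_fold_trans (ps : List (Int × Int)) (d : Option Int) (c : Int) :
    (ps.foldl (fun s p => pvStepA s p.1 p.2) (d, c)).2
      = c + pvTrans d (ps.filterMap pvSgn) := by
  induction ps generalizing d c with
  | nil => simp [pvTrans]
  | cons p rest ih =>
    rcases p with ⟨a, b⟩
    by_cases hgt : b > a
    · have hne : a ≠ b := by omega
      have hstep : pvStepA (d, c) a b = (some 1, if d = some (-1) then c + 1 else c) := by
        simp [pvStepA, hgt]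
      have hsgn : pvSgn (a, b) = some 1 := by simp [pvSgn, hne, hgt]
      rw [List.foldl_cons, hstep, ih, List.filterMap_cons_some hsgn]
      simp only [pvTrans]
      split_ifs <;> ring
    · by_cases hlt : b < a
      · have hne : a ≠ b := by omega
        have hstep : pvStepA (d, c) a b = (some (-1), if d = some 1 then c + 1 else c) := by
          simp [pvStepA, hgt, hlt]
        have hsgn : pvSgn (a, b) = some (-1) := by simp [pvSgn, hne, hgt]
        rw [List.foldl_cons, hstep, ih, List.filterMap_cons_some hsgn]
        simp only [pvTrans, neg_neg]
        split_ifs <;> ring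
      · have heq : a = b := by omega
        have hstep : pvStepA (d, c) a b = (d, c) := by simp [pvStepA, hgt, hlt]
        have hsgn : pvSgn (a, b) = none := by simp [pvSgn, heq]
        rw [List.foldl_cons, hstep, ih, List.filterMap_cons_none hsgn]

-- the filterMap over consecutive pairs is pvSigns
theorem pv_signs_eq : ∀ (l : List Int) (x : Int),
    ((x :: l).zip l).filterMap pvSgn = pvSigns (x :: l) := by
  intro l
  induction l with
  | nil => intro x; simp [pvSigns]
  | cons y r ih =>
    intro x
    by_cases h : x = y
    · subst h
      have hn : pvSgn (x, x) = none := by simp [pvSgn]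
      simp only [List.zip_cons_cons, List.filterMap_cons, hn, pvSigns, if_pos]
      exact ih x
    · have : pvSgn (x, y) = some (if y > x then (1 : Int) else -1) := by simp [pvSgn, h]
      simp only [List.zip_cons_cons, List.filterMap_cons, this, pvSigns, if_neg h]
      rw [ih y]

-- B's dedup fold equals pvDed1
theorem pv_foldl_ded : ∀ (l acc : List Int) (p : Int), acc.getLast? = some p →
    l.foldl (fun d x => if d = [] ∨ d.getLast? ≠ some x then d ++ [x] else d) acc
      = acc ++ pvDed1 p l := by
  intro l
  induction l with
  | nil => intro acc p _; simp [pvDed1]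
  | cons y r ih =>
    intro acc p hlast
    have hacc : acc ≠ [] := by intro h; rw [h] at hlast; simp at hlast
    by_cases hyp : y = p
    · subst hyp
      have : (if acc = [] ∨ acc.getLast? ≠ some y then acc ++ [y] else acc) = acc := by
        rw [if_neg]
        simp only [not_or, not_not]
        exact ⟨hacc, hlast⟩
      rw [List.foldl_cons, this, ih acc y hlast]
      simp [pvDed1]
    · have : (if acc = [] ∨ acc.getLast? ≠ some y then acc ++ [y] else acc) = acc ++ [y] := by
        rw [if_pos]; right; rw [hlast]; simpa using fun h => hyp h.symm
      rw [List.foldl_cons, this, ih (acc ++ [y]) y (by simp)]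
      simp [pvDed1, if_neg hyp]

-- the collapsed list has no equal neighbours
theorem pv_ded1_chain : ∀ (l : List Int) (p : Int),
    List.IsChain (· ≠ ·) (p :: pvDed1 p l) := by
  intro l
  induction l with
  | nil => intro p; simp [pvDed1]
  | cons y r ih =>
    intro p
    by_cases h : y = p
    · simpa [pvDed1, h] using ih p
    · rw [show pvDed1 p (y :: r) = y :: pvDed1 y r by simp [pvDed1, if_neg h]]
      exact List.isChain_cons_cons.mpr ⟨fun hh => h hh.symm, ih y⟩

-- collapsing equal neighbours does not change the sign list
theorem pv_ded1_signs : ∀ (l : List Int) (p : Int),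
    pvSigns (p :: pvDed1 p l) = pvSigns (p :: l) := by
  intro l
  induction l with
  | nil => intro p; simp [pvDed1]
  | cons y r ih =>
    intro p
    by_cases h : y = p
    · subst h
      rw [show pvDed1 y (y :: r) = pvDed1 y r by simp [pvDed1]]
      rw [ih y]
      simp [pvSigns]
    · rw [show pvDed1 p (y :: r) = y :: pvDed1 y r by simp [pvDed1, if_neg h]]
      have h' : p ≠ y := fun hh => h hh.symm
      simp only [pvSigns, if_neg h']
      rw [ih y]

-- the while-loop of _peel: transitions seen from direction `up` split at the scan's break
theorem pv_scan_trans : ∀ (t : List Int) (prev : Int) (up : Bool),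
    List.IsChain (· ≠ ·) (prev :: t) →
    pvTrans (some (if up then 1 else -1)) (pvSigns (prev :: t)) =
      (if pvScan up prev t = [] then 0 else 1 + pvTrans none (pvSigns (pvScan up prev t))) := by
  intro t
  induction t with
  | nil => intro prev up _; simp [pvScan, pvSigns, pvTrans]
  | cons x r ih =>
    intro prev up hch
    rw [List.isChain_cons_cons] at hch
    obtain ⟨hne, hch'⟩ := hch
    have hsx : pvSigns (prev :: x :: r)
        = (if x > prev then (1 : Int) else -1) :: pvSigns (x :: r) := by
      simp [pvSigns, hne]
    by_cases hc : decide (x > prev) = up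
    · have hscan : pvScan up prev (x :: r) = pvScan up x r := by
        simp [pvScan, hc]
      have hsgn : (if x > prev then (1 : Int) else -1) = (if up then 1 else -1) := by
        cases up <;> simp_all
      have hz : (if some (if up then (1 : Int) else -1)
          = some (-(if up then (1 : Int) else -1)) then (1 : Int) else 0) = 0 := by
        cases up <;> norm_num
      rw [hsx, hsgn, hscan]
      simp only [pvTrans, hz]
      rw [ih x up hch']
      ring_nf
    · have hscan : pvScan up prev (x :: r) = prev :: x :: r := by
        simp only [pvScan]
        rw [if_neg (by simpa using hc)]
      have hsgn : (if x > prev then (1 : Int) else -1) = -(if up then 1 else -1) := by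
        cases up <;> simp_all
      rw [hsx, hscan, if_neg (List.cons_ne_nil _ _)]
      simp only [pvTrans, hsgn, neg_neg]
      rw [hsx]
      simp only [hsgn, pvTrans]
      cases up <;> simp
  
-- the scan result keeps the no-equal-neighbours property
theorem pv_scan_chain : ∀ (t : List Int) (prev : Int) (up : Bool),
    List.IsChain (· ≠ ·) (prev :: t) → List.IsChain (· ≠ ·) (pvScan up prev t) := by
  intro t
  induction t with
  | nil => intro prev up _; simp only [pvScan]; exact List.isChain_nil
  | cons x r ih =>
    intro prev up hch
    rw [List.isChain_cons_cons] at hch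
    simp only [pvScan]
    split
    · exact ih x up hch.2
    · exact List.isChain_cons_cons.mpr hch

-- the peel loop counts 1 + (number of sign transitions)
theorem pv_runsLoop : ∀ (n : Nat) (d : List Int), d.length ≤ n → d ≠ [] →
    List.IsChain (· ≠ ·) d → ∀ c : Int,
    pvRunsLoop d c = c + 1 + pvTrans none (pvSigns d) := by
  intro n
  induction n with
  | zero => intro d hlen hne _ _; cases d with
    | nil => exact absurd rfl hne
    | cons a t => simp at hlen
  | succ n ih =>
    intro d hlen hne hch c
    cases d with
    | nil => exact absurd rfl hne
    | cons a t =>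
      rw [pvRunsLoop]
      cases t with
      | nil => simp [pvPeel, pvRunsLoop, pvSigns, pvTrans]
      | cons b r =>
        rw [List.isChain_cons_cons] at hch
        obtain ⟨hab, hch'⟩ := hch
        have hpeel : pvPeel (a :: b :: r) = pvScan (decide (b > a)) b r := rfl
        have hsgn0 : pvSigns (a :: b :: r)
            = (if b > a then (1 : Int) else -1) :: pvSigns (b :: r) := by
          simp [pvSigns, hab]
        have hup : (if decide (b > a) then (1 : Int) else -1)
            = (if b > a then (1 : Int) else -1) := by
          by_cases h : b > a <;> simp [h]
        have hst := pv_scan_trans r b (decide (b > a)) hch'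
        rw [hup] at hst
        by_cases hsc : pvScan (decide (b > a)) b r = []
        · rw [hpeel, hsc, pvRunsLoop]
          rw [hsgn0]
          have : pvTrans none ((if b > a then (1 : Int) else -1) :: pvSigns (b :: r))
              = pvTrans (some (if b > a then (1 : Int) else -1)) (pvSigns (b :: r)) := by
            simp [pvTrans]
          rw [this, hst, if_pos hsc]
          ring
        · have hlen' : (pvScan (decide (b > a)) b r).length ≤ n := by
            have := pvScan_length (decide (b > a)) b r
            simp only [List.length_cons] at hlen
            omega
          have hchs := pv_scan_chain r b (decide (b > a)) hch'
          rw [hpeel, ih _ hlen' hsc hchs (c + 1)]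
          rw [hsgn0]
          have : pvTrans none ((if b > a then (1 : Int) else -1) :: pvSigns (b :: r))
              = pvTrans (some (if b > a then (1 : Int) else -1)) (pvSigns (b :: r)) := by
            simp [pvTrans]
          rw [this, hst, if_neg hsc]
          ring

-- ===== VERDICT (by name: the statement is the Claim_ definition above) =====
theorem count_monotonic_ranges_spec : Claim_equal_count_monotonic_ranges := by
  intro nums _
  unfold Spec_count_monotonic_ranges count_monotonic_ranges count_monotonic_ranges_alt
  rcases nums with _ | ⟨x, l⟩
  · simp
  · rw [if_neg (List.cons_ne_nil x l), if_neg (List.cons_ne_nil x l)]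
    -- A side
    have hlen : (((x :: l).length : Int) - 1).toNat = l.length := by
      simp only [List.length_cons]; omega
    rw [PySem.List.pyRange_one, hlen, List.foldl_map]
    have hbody : (fun (s : Option Int × Int) (k : ℕ) =>
        pvStepA s (PySem.List.pyGetD (x :: l) (1 + (k : Int) - 1) 0)
          (PySem.List.pyGetD (x :: l) (1 + (k : Int)) 0))
        = (fun s k => pvStepA s ((x :: l).getD k 0) ((x :: l).getD (k + 1) 0)) := by
      funext s k
      have h1 : (1 : Int) + (k : Int) - 1 = ((k : ℕ) : Int) := by omega
      have h2 : (1 : Int) + (k : Int) = ((k + 1 : ℕ) : Int) := by omega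
      rw [h1, h2, PySem.List.pyGetD_natCast, PySem.List.pyGetD_natCast]
    rw [hbody, pv_idx_pairs, pv_fold_trans, pv_signs_eq]
    -- B side
    have hded : (x :: l).foldl
        (fun d x => if d = [] ∨ d.getLast? ≠ some x then d ++ [x] else d) []
        = x :: pvDed1 x l := by
      rw [List.foldl_cons]
      rw [show (if ([] : List Int) = [] ∨ ([] : List Int).getLast? ≠ some x
            then ([] : List Int) ++ [x] else []) = [x] by simp]
      exact pv_foldl_ded l [x] x (by simp)
    rw [hded, pv_runsLoop (x :: pvDed1 x l).length _ le_rfl (List.cons_ne_nil _ _)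
      (pv_ded1_chain l x) 0, pv_ded1_signs]
    ring
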